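-- pv_equiv track=rewrite | github.com/jasmine-dragons/HAX121 | problem17.py | binaryPrime
-- ===== SOURCE A (Python) =====
-- def isPrime(num):
--     if num <= 1:
--         return False
--     for divide in range(2, num):
--         if (num % divide) == 0:
--             return False
--     return True
--
-- def binaryPrime(nums):
--     nums = sorted(nums)
--     largestPrime = None
--     for x in range (len(nums)-1, 0, -1):
--         if (isPrime(nums[x])):
--             largestPrime = nums[x]
--             break
--
--     left = 0
--     right = len(nums) -1
--     count = 0
--     while (left <= right) :
--         count += 1
--         mid = (left +right)//2
--         tempNum = nums[mid]
--
--         if(nums[mid] == largestPrime):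
--             return count
--         elif(nums[mid] < largestPrime):
--             left = mid + 1
--         else:
--             right = mid-1
-- ===== SOURCE B (Python) =====
-- def isPrime(num):
--     if num <= 1:
--         return False
--     divide = 2
--     while divide * divide <= num:
--         if num % divide == 0:
--             return False
--         divide += 1
--     return True
--
-- def binaryPrime(nums):
--     s = sorted(nums)
--     target = max(x for x in s if isPrime(x))
--
--     def search(lo, hi, steps):
--         mid = (lo + hi) // 2
--         if s[mid] == target:
--             return steps + 1
--         if s[mid] < target:
--             return search(mid + 1, hi, steps + 1)
--         return search(lo, mid - 1, steps + 1)
--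
--     return search(0, len(s) - 1, 0)
-- ===== Notes on version B (the rewrite author's own statement) =====
-- stated objective: alternative
-- what changed: B finds the target as max over a prime filter instead of A's scan-down-with-break loop, replaces the iterative while-loop binary search by a recursive divide-and-conquer step counter, and bounds isPrime's trial division by divide*divide <= num instead of scanning all of range(2, num).
-- outside the precondition, e.g. on binaryPrime([]): A returns None, B raises ValueError; on binaryPrime([4, 6]): A raises TypeError, B raises ValueError; on binaryPrime([2, 4]): A raises TypeError, B returns 1
import Mathlib
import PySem

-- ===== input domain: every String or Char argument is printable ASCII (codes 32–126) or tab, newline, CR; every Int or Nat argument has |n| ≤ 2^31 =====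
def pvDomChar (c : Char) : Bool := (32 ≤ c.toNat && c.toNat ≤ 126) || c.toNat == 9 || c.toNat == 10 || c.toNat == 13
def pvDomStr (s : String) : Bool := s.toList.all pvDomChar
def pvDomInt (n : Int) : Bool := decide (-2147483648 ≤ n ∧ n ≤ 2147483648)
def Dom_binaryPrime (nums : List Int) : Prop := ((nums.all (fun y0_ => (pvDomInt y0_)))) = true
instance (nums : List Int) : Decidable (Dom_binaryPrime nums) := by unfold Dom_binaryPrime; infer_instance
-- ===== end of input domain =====

-- B replaces A's scan-down-with-break prime search by max over a prime filter and the
-- iterative binary-search loop by a recursive step counter: an alternative decomposition,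
-- equal on every input where A returns an int (Pre_); A only rebinds its local `nums`,
-- neither implementation mutates the caller's list.


-- ===== PORT A =====
-- A's isPrime: the `for divide in range(2, num)` loop with its early `return False` is
-- the recursion below (one step per divisor, stopping at the first divisor found,
-- exactly as the Python loop does; fuel = the range's length only makes it total)
def isPrimeLoop (num : Int) : Nat → Int → Bool
  | 0, _ => true
  | fuel+1, d => if PySem.Int.mod num d == 0 then false else isPrimeLoop num fuel (d + 1)

def isPrimeP (num : Int) : Bool :=
  if num ≤ 1 then false
  else isPrimeLoop num (num - 2).toNat 2

-- the `for x in range(len(nums)-1, 0, -1): … break` scan for largestPrime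
def scanA (s : List Int) : List Int → Option Int
  | [] => none
  | x :: rest =>
    match PySem.List.pyGet? s x with
    | some v => if isPrimeP v then some v else scanA s rest
    | none => none          -- unreachable: indices come from range(len-1, 0, -1)

-- the `while left <= right` loop; fuel only makes the recursion total (the interval
-- shrinks every iteration, so fuel = len+1 is never exhausted).
def bsearchA (s : List Int) (tgt : Option Int) : Nat → Int → Int → Int → Int
  | 0, _, _, _ => 0
  | fuel+1, left, right, count =>
    if left ≤ right then
      let count := count + 1
      let mid := PySem.Int.floordiv (left + right) 2
      match PySem.List.pyGet? s mid, tgt with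
      | some v, some t =>
        if v = t then count
        else if v < t then bsearchA s tgt fuel (mid+1) right count
        else bsearchA s tgt fuel left (mid-1) count
      | _, _ => 0           -- nums[mid] < None: Python raises TypeError (outside Pre_)
    else 0                  -- loop falls through, Python returns None (outside Pre_)

def binaryPrime (nums : List Int) : Int :=
  let s := PySem.List.sorted nums (fun x => x) false
  let largestPrime := scanA s (PySem.List.pyRange (PySem.List.len s - 1) 0 (-1))
  bsearchA s largestPrime (s.length + 1) 0 (PySem.List.len s - 1) 0

-- ===== PORT B =====
-- B's isPrime: trial division only while divide * divide <= num (Source B's while loop;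
-- fuel num.toNat + 1 exceeds the iteration count and only makes the recursion total)
def isPrimeBLoop (num : Int) : Nat → Int → Bool
  | 0, _ => true
  | fuel+1, d =>
    if num < d * d then true
    else if PySem.Int.mod num d == 0 then false
    else isPrimeBLoop num fuel (d + 1)

def isPrimeB (num : Int) : Bool :=
  if num ≤ 1 then false
  else isPrimeBLoop num (num.toNat + 1) 2

-- recursive divide-and-conquer step counter (Source B's `search`); same totality fuel
def searchB (s : List Int) (t : Int) : Nat → Int → Int → Int → Int
  | 0, _, _, _ => 0
  | fuel+1, lo, hi, steps =>
    let mid := PySem.Int.floordiv (lo + hi) 2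
    match PySem.List.pyGet? s mid with
    | none => 0             -- s[mid] IndexError (outside Pre_)
    | some v =>
      if v = t then steps + 1
      else if v < t then searchB s t fuel (mid+1) hi (steps + 1)
      else searchB s t fuel lo (mid-1) (steps + 1)

def binaryPrime_alt (nums : List Int) : Int :=
  let s := PySem.List.sorted nums (fun x => x) false
  match PySem.List.max? (s.filter isPrimeB) (fun x => x) with
  | none => 0               -- max() of empty generator: Python raises ValueError (outside Pre_)
  | some t => searchB s t (s.length + 1) 0 (PySem.List.len s - 1) 0

-- ===== PRECONDITION & SPEC =====
-- Pre_ excludes exactly the inputs where A returns no int: the empty list (A returns None)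
-- and nonempty lists with no prime at sorted index ≥ 1 (largestPrime stays None and
-- `nums[mid] < None` raises TypeError).
-- isPrimeQ is a fast (trial division up to sqrt) primality test used only to STATE the
-- precondition; isPrimeQ_eq below proves it equal to the ports' isPrimeP.
def primeLoopQ (m : Nat) : Nat → Nat → Bool
  | 0, _ => true
  | fuel+1, d => if m < d * d then true else if m % d == 0 then false else primeLoopQ m fuel (d + 1)

def isPrimeQ (n : Int) : Bool := decide (1 < n) && primeLoopQ n.toNat n.toNat 2

def Pre_binaryPrime (nums : List Int) : Prop :=
  (((PySem.List.sorted nums (fun x => x) false).drop 1).any isPrimeQ) = true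
instance (nums : List Int) : Decidable (Pre_binaryPrime nums) := by unfold Pre_binaryPrime; infer_instance

def pvWitness_binaryPrime : List Int := [3, 5]

def Spec_binaryPrime (nums : List Int) (out : Int) : Prop := out = binaryPrime_alt nums
instance (nums : List Int) (out : Int) : Decidable (Spec_binaryPrime nums out) := by unfold Spec_binaryPrime; infer_instance

-- ===== CLAIM (what is proved, stated in full; the proofs are below) =====
def Claim_equal_binaryPrime : Prop := ∀ (nums : List Int), Dom_binaryPrime nums → Pre_binaryPrime nums → Spec_binaryPrime nums (binaryPrime nums)

-- ===== LEMMAS AND PROOFS =====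

-- A's/B's trial-division loop accepts iff no divisor lies in its window
theorem isPrimeLoop_iff (num : Int) : ∀ (fuel : Nat) (d : Int),
    isPrimeLoop num fuel d = true ↔ ∀ k : Int, d ≤ k → k < d + fuel → ¬ (k ∣ num) := by
  intro fuel
  induction fuel with
  | zero =>
    intro d
    constructor
    · intro _ k h1 h2; exfalso; push_cast at h2; omega
    · intro _; rfl
  | succ fuel ih =>
    intro d
    rw [isPrimeLoop]
    by_cases hm : PySem.Int.mod num d = 0
    · simp only [hm, BEq.rfl, if_true]
      constructor
      · intro h; exact absurd h (by simp)
      · intro hall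
        exact absurd ((PySem.Int.mod_eq_zero_iff_dvd num d).mp hm)
          (hall d le_rfl (by push_cast; omega))
    · have hne : (PySem.Int.mod num d == 0) = false := by simpa using hm
      rw [hne, if_neg (by simp), ih (d + 1)]
      constructor
      · intro h k h1 h2
        rcases eq_or_lt_of_le h1 with rfl | hlt
        · exact fun hdvd => hm ((PySem.Int.mod_eq_zero_iff_dvd num d).mpr hdvd)
        · exact h k (by omega) (by push_cast at h2 ⊢; omega)
      · intro h k h1 h2
        exact h k (by omega) (by push_cast at h2 ⊢; omega)

-- the sqrt-bounded loop accepts iff no divisor ≤ sqrt lies in its window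
theorem primeLoopQ_iff (m : Nat) : ∀ (fuel d : Nat),
    primeLoopQ m fuel d = true ↔ ∀ k, d ≤ k → k < d + fuel → k * k ≤ m → ¬ k ∣ m := by
  intro fuel
  induction fuel with
  | zero =>
    intro d
    constructor
    · intro _ k h1 h2 _; omega
    · intro _; rfl
  | succ fuel ih =>
    intro d
    rw [primeLoopQ]
    by_cases hsq : m < d * d
    · simp only [hsq, if_true]
      constructor
      · intro _ k h1 _ hkk
        exact absurd hkk (by have := Nat.mul_le_mul h1 h1; omega)
      · intro _; trivial
    · rw [if_neg hsq]
      by_cases hm : m % d = 0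
      · simp only [hm, BEq.rfl, if_true]
        constructor
        · intro h; exact absurd h (by simp)
        · intro hall
          exact absurd (Nat.dvd_of_mod_eq_zero hm)
            (hall d le_rfl (by omega) (by omega))
      · have hne : (m % d == 0) = false := by simpa using hm
        rw [hne, if_neg (by simp), ih (d + 1)]
        constructor
        · intro h k h1 h2 hkk
          rcases eq_or_lt_of_le h1 with rfl | hlt
          · exact fun hdvd => hm (by obtain ⟨c, rfl⟩ := hdvd; exact Nat.mul_mod_right d c)
          · exact h k (by omega) (by omega) hkk
        · intro h k h1 h2 hkk
          exact h k (by omega) (by omega) hkk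

-- B's sqrt-bounded trial-division loop accepts iff no divisor lies in its window
theorem isPrimeBLoop_iff (num : Int) : ∀ (fuel : Nat) (d : Int), 0 < d →
    (isPrimeBLoop num fuel d = true ↔
      ∀ k : Int, d ≤ k → k < d + fuel → k * k ≤ num → ¬ (k ∣ num)) := by
  intro fuel
  induction fuel with
  | zero =>
    intro d _
    constructor
    · intro _ k h1 h2 _; push_cast at h2; omega
    · intro _; rfl
  | succ fuel ih =>
    intro d hd
    rw [isPrimeBLoop]
    by_cases hsq : num < d * d
    · simp only [hsq, if_true]
      constructor
      · intro _ k h1 _ hkk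
        have : d * d ≤ k * k := mul_le_mul h1 h1 (by omega) (by omega)
        omega
      · intro _; trivial
    · rw [if_neg hsq]
      by_cases hm : PySem.Int.mod num d = 0
      · simp only [hm, BEq.rfl, if_true]
        constructor
        · intro h; exact absurd h (by simp)
        · intro hall
          exact absurd ((PySem.Int.mod_eq_zero_iff_dvd num d).mp hm)
            (hall d le_rfl (by push_cast; omega) (by omega))
      · have hne : (PySem.Int.mod num d == 0) = false := by simpa using hm
        rw [hne, if_neg (by simp), ih (d + 1) (by omega)]
        constructor
        · intro h k h1 h2 hkk
          rcases eq_or_lt_of_le h1 with rfl | hlt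
          · exact fun hdvd => hm ((PySem.Int.mod_eq_zero_iff_dvd num d).mpr hdvd)
          · exact h k (by omega) (by push_cast at h2 ⊢; omega) hkk
        · intro h k h1 h2 hkk
          exact h k (by omega) (by push_cast at h2 ⊢; omega) hkk

-- B's isPrime equals the fast precondition predicate
theorem isPrimeB_eq_isPrimeQ (n : Int) : isPrimeB n = isPrimeQ n := by
  unfold isPrimeB isPrimeQ
  by_cases hn : n ≤ 1
  · simp [hn, show ¬ (1 : Int) < n from by omega]
  · have hn1 : (1 : Int) < n := by omega
    rw [if_neg hn]
    simp only [hn1, decide_true, Bool.true_and]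
    have hmn : ((n.toNat : Int)) = n := Int.toNat_of_nonneg (by omega)
    apply Bool.eq_iff_iff.mpr
    rw [isPrimeBLoop_iff n _ 2 (by norm_num), primeLoopQ_iff]
    constructor
    · intro h k hk2 _ hkk hdvd
      exact h (k : Int) (by exact_mod_cast hk2) (by push_cast; omega)
        (by rw [← hmn]; exact_mod_cast hkk)
        (by rw [← hmn]; exact_mod_cast hdvd)
    · intro h k hk2 hkw hkk hdvd
      have hk0 : 0 ≤ k := by omega
      have hkn : k ≤ n := by nlinarith
      have hkk' : (k.toNat : Int) * (k.toNat : Int) ≤ (n.toNat : Int) := by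
        rw [Int.toNat_of_nonneg hk0, hmn]; exact hkk
      refine h k.toNat (by omega) (by omega) (by exact_mod_cast hkk')
        (by rw [← Int.natCast_dvd_natCast, hmn, Int.toNat_of_nonneg hk0]; exact hdvd)

-- the fast precondition predicate equals A's isPrime
theorem isPrimeQ_eq (n : Int) : isPrimeQ n = isPrimeP n := by
  unfold isPrimeQ isPrimeP
  by_cases hn : n ≤ 1
  · simp [hn, show ¬ (1 < n) from by omega]
  · have hn1 : (1 : Int) < n := by omega
    rw [if_neg (by omega)]
    have hmn : ((n.toNat : Int)) = n := Int.toNat_of_nonneg (by omega)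
    have hm2 : 2 ≤ n.toNat := by omega
    simp only [hn1, decide_true, Bool.true_and]
    have hA : isPrimeLoop n (n - 2).toNat 2 = true ↔ ∀ k : Int, 2 ≤ k → k < n → ¬ (k ∣ n) := by
      rw [isPrimeLoop_iff]
      have hw : (2 : Int) + ((n - 2).toNat : Int) = n := by omega
      rw [hw]
    have hB : primeLoopQ n.toNat n.toNat 2 = true ↔ Nat.Prime n.toNat := by
      rw [primeLoopQ_iff, Nat.prime_def_le_sqrt]
      constructor
      · refine fun h => ⟨hm2, fun k hk2 hks => ?_⟩
        have hs := Nat.sqrt_le_self n.toNat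
        exact h k hk2 (by omega) (Nat.le_sqrt.mp hks)
      · rintro ⟨-, hp⟩ k hk2 _ hkk
        exact hp k hk2 (Nat.le_sqrt.mpr hkk)
    have hAB : (∀ k : Int, 2 ≤ k → k < n → ¬ (k ∣ n)) ↔ Nat.Prime n.toNat := by
      rw [Nat.prime_def_lt']
      constructor
      · refine fun h => ⟨hm2, fun k hk2 hkm => ?_⟩
        intro hdvd
        exact h (k : Int) (by exact_mod_cast hk2)
          (by rw [← hmn]; exact_mod_cast hkm)
          (by rw [← hmn]; exact_mod_cast hdvd)
      · rintro ⟨-, hp⟩ k hk2 hkn hdvd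
        have hk0 : 0 ≤ k := by omega
        have hdvd' : k.toNat ∣ n.toNat := by
          rw [← Int.natCast_dvd_natCast, hmn, Int.toNat_of_nonneg hk0]
          exact hdvd
        exact hp k.toNat (by omega) (by omega) hdvd'
    exact Bool.eq_iff_iff.mpr (by rw [hB, hA]; exact hAB.symm)

-- A's scan over in-range indices is find? over the fetched values
theorem scanA_eq_find (s : List Int) (idxs : List Int)
    (h : ∀ x ∈ idxs, 0 ≤ x ∧ x < (s.length : Int)) :
    scanA s idxs = (idxs.map (fun x => PySem.List.pyGetD s x 0)).find? isPrimeP := by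
  induction idxs with
  | nil => rfl
  | cons x rest ih =>
    obtain ⟨h0, h1⟩ := h x (by simp)
    have hd : PySem.List.pyGetD s x 0 = s[x.toNat] := PySem.List.pyGetD_eq_getElem s 0 h0 h1
    rw [scanA, PySem.List.pyGet?_eq_some_getElem s h0 h1]
    simp only [List.map_cons, List.find?_cons, hd]
    by_cases hp : isPrimeP s[x.toNat] = true <;> simp only [hp, if_pos, Bool.false_eq_true, if_false]
    exact ih fun y hy => h y (by simp [hy])

-- last satisfying element: find? on the reverse = last of the filter (any list)
theorem find?_reverse_eq_getLast?_filter (p : Int → Bool) (u : List Int) :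
    u.reverse.find? p = (u.filter p).getLast? := by
  induction u with
  | nil => rfl
  | cons a v ih =>
    rw [List.reverse_cons, List.find?_append, ih, List.filter_cons]
    by_cases hp : p a = true
    · simp only [hp, if_pos]
      cases hE : (v.filter p).getLast? with
      | none =>
        rw [List.getLast?_eq_none_iff.mp hE]
        simp [List.find?, hp]
      | some g =>
        obtain ⟨ys, hys⟩ := List.getLast?_eq_some_iff.mp hE
        rw [hys, show a :: (ys ++ [g]) = (a :: ys) ++ [g] from by simp, List.getLast?_concat]
        rfl
    · simp [hp]

-- Python max of a ≤-sorted list is its last element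
theorem max?_eq_getLast?_of_pairwise (w : List Int) (hw : w.Pairwise (· ≤ ·)) :
    PySem.List.max? w (fun x => x) = w.getLast? := by
  rcases Option.eq_none_or_eq_some (PySem.List.max? w (fun x => x)) with h | ⟨m, hm⟩
  · rw [h, (PySem.List.max?_eq_none_iff w _).mp h]; rfl
  · have hne : w ≠ [] := by
      rintro rfl
      rw [(PySem.List.max?_eq_none_iff [] (fun x : Int => x)).mpr rfl] at hm
      simp at hm
    obtain ⟨g, hg⟩ : ∃ g, w.getLast? = some g := by
      cases hE : w.getLast? with
      | none => exact absurd (List.getLast?_eq_none_iff.mp hE) hne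
      | some g => exact ⟨g, rfl⟩
    obtain ⟨ys, hys⟩ := List.getLast?_eq_some_iff.mp hg
    subst hys
    have hmax := PySem.List.max?_isMax hm
    have hmem := PySem.List.max?_mem hm
    have hle : ∀ y ∈ ys ++ [g], y ≤ g := by
      intro y hy
      rcases List.mem_append.mp hy with h' | h'
      · exact (List.pairwise_append.mp hw).2.2 y h' g (by simp)
      · simp_all
    rw [hm, hg]
    exact congrArg some (le_antisymm (hle m hmem) (hmax g (by simp)))

-- the two target computations agree under Pre_
theorem targets_eq (s : List Int) (hs : s.Pairwise (· ≤ ·))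
    (hpre : ((s.drop 1).any isPrimeP) = true) :
    scanA s (PySem.List.pyRange (PySem.List.len s - 1) 0 (-1))
      = PySem.List.max? (s.filter isPrimeP) (fun x => x) := by
  have hidx : PySem.List.pyRange (PySem.List.len s - 1) 0 (-1)
      = (PySem.List.pyRange 1 (PySem.List.len s) 1).reverse := by
    rw [PySem.List.pyRange_neg_one_eq_reverse]; norm_num
  have hmap : (PySem.List.pyRange 1 (PySem.List.len s) 1).map (fun x => PySem.List.pyGetD s x 0)
      = s.drop 1 := by
    simpa using PySem.List.map_pyGetD_pyRange s 0 (by norm_num : (0:Int) ≤ 1)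
  rw [scanA_eq_find s _ (by
    intro x hx
    rw [hidx, List.mem_reverse, PySem.List.mem_pyRange_one] at hx
    simp only [PySem.List.len_eq] at hx
    omega)]
  rw [hidx, List.map_reverse, hmap, find?_reverse_eq_getLast?_filter]
  rw [max?_eq_getLast?_of_pairwise _ (List.Pairwise.filter _ hs)]
  -- last of the tail's filter = last of the whole filter, since the tail filter is nonempty
  cases s with
  | nil => simp at hpre
  | cons h tl =>
    simp only [List.drop_succ_cons, List.drop_zero] at hpre ⊢
    have htl : tl.filter isPrimeP ≠ [] := by
      simp only [ne_eq, List.filter_eq_nil_iff]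
      rw [List.any_eq_true] at hpre
      obtain ⟨x, hx, hpx⟩ := hpre
      exact fun hall => by simpa [hpx] using hall x hx
    rw [List.filter_cons]
    split
    · obtain ⟨g, hg⟩ : ∃ g, (tl.filter isPrimeP).getLast? = some g := by
        cases hE : (tl.filter isPrimeP).getLast? with
        | none => exact absurd (List.getLast?_eq_none_iff.mp hE) htl
        | some g => exact ⟨g, rfl⟩
      obtain ⟨ys, hys⟩ := List.getLast?_eq_some_iff.mp hg
      rw [hg, hys, show h :: (ys ++ [g]) = (h :: ys) ++ [g] by simp, List.getLast?_concat]
    · rfl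

-- lockstep: with the target present in s[lo..hi] and s sorted, A's while loop and B's
-- recursion take the same path and return the same count
theorem bsearch_eq (s : List Int) (t : Int) (hs : s.Pairwise (· ≤ ·)) :
    ∀ (fuel : Nat) (lo hi c : Int),
      (∃ i : Nat, lo ≤ (i : Int) ∧ (i : Int) ≤ hi ∧ s[i]? = some t) →
      0 ≤ lo → hi ≤ (s.length : Int) - 1 → hi - lo + 1 ≤ (fuel : Int) →
      bsearchA s (some t) fuel lo hi c = searchB s t fuel lo hi c := by
  have mono : ∀ (p q : Nat) (hp : p < s.length) (hq : q < s.length), p ≤ q → s[p] ≤ s[q] := by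
    intro p q hp hq hpq
    rcases Nat.eq_or_lt_of_le hpq with rfl | hlt
    · exact le_refl _
    · exact List.pairwise_iff_getElem.mp hs p q hp hq hlt
  intro fuel
  induction fuel with
  | zero =>
    intro lo hi c ⟨i, h1, h2, _⟩ _ _ hfuel
    exfalso; push_cast at hfuel; omega
  | succ fuel ih =>
    intro lo hi c ⟨i, h1, h2, hival⟩ hlo hhi hfuel
    obtain ⟨hilen, hival⟩ : i < s.length ∧ s[i]'(by exact (List.getElem?_eq_some_iff.mp hival).1) = t := by
      obtain ⟨hl, hv⟩ := List.getElem?_eq_some_iff.mp hival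
      exact ⟨hl, hv⟩
    have hlohi : lo ≤ hi := le_trans h1 h2
    obtain ⟨hm1, hm2⟩ := PySem.Int.floordiv_two_mid_bounds hlohi
    have hmidlen : PySem.Int.floordiv (lo + hi) 2 < (s.length : Int) := by omega
    have hmid0 : 0 ≤ PySem.Int.floordiv (lo + hi) 2 := le_trans hlo hm1
    rw [bsearchA, searchB, if_pos hlohi]
    simp only []
    rw [PySem.List.pyGet?_eq_some_getElem s hmid0 hmidlen]
    dsimp only
    by_cases hveq : s[(PySem.Int.floordiv (lo + hi) 2).toNat] = t
    · rw [if_pos hveq, if_pos hveq]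
    · rw [if_neg hveq, if_neg hveq]
      by_cases hvlt : s[(PySem.Int.floordiv (lo + hi) 2).toNat] < t
      · rw [if_pos hvlt, if_pos hvlt]
        apply ih
        · refine ⟨i, ?_, h2, by rw [List.getElem?_eq_some_iff]; exact ⟨hilen, hival⟩⟩
          by_contra hcon
          have hi_le_mid : i ≤ (PySem.Int.floordiv (lo + hi) 2).toNat := by omega
          have := mono i (PySem.Int.floordiv (lo + hi) 2).toNat hilen (by omega) hi_le_mid
          rw [hival] at this; omega
        · omega
        · exact hhi
        · push_cast at hfuel; omega
      · rw [if_neg hvlt, if_neg hvlt]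
        apply ih
        · refine ⟨i, h1, ?_, by rw [List.getElem?_eq_some_iff]; exact ⟨hilen, hival⟩⟩
          by_contra hcon
          have hmid_le_i : (PySem.Int.floordiv (lo + hi) 2).toNat ≤ i := by omega
          have := mono (PySem.Int.floordiv (lo + hi) 2).toNat i (by omega) hilen hmid_le_i
          rw [hival] at this; omega
        · exact hlo
        · omega
        · push_cast at hfuel; omega

-- ===== VERDICT (by name: the statement is the Claim_ definition above) =====
theorem binaryPrime_spec : Claim_equal_binaryPrime := by
  intro nums _ hpre
  unfold Spec_binaryPrime
  simp only [binaryPrime, binaryPrime_alt]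
  set s := PySem.List.sorted nums (fun x => x) false with hsdef
  have hs : s.Pairwise (· ≤ ·) := by
    simpa using PySem.List.sorted_pairwise nums (fun x => x)
  have hpre' : ((s.drop 1).any isPrimeP) = true := by
    have h := hpre
    unfold Pre_binaryPrime at h
    rw [← hsdef, show isPrimeQ = isPrimeP from funext isPrimeQ_eq] at h
    exact h
  rw [show isPrimeB = isPrimeP from funext fun x => (isPrimeB_eq_isPrimeQ x).trans (isPrimeQ_eq x)]
  rw [targets_eq s hs hpre']
  obtain ⟨t, ht⟩ : ∃ t, PySem.List.max? (s.filter isPrimeP) (fun x => x) = some t := by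
    cases hE : PySem.List.max? (s.filter isPrimeP) (fun x => x) with
    | none =>
      exfalso
      have hnil := (PySem.List.max?_eq_none_iff _ _).mp hE
      rw [List.any_eq_true] at hpre'
      obtain ⟨x, hx, hpx⟩ := hpre'
      exact (List.filter_eq_nil_iff.mp hnil) x (List.mem_of_mem_drop hx) hpx
    | some t => exact ⟨t, rfl⟩
  rw [ht]
  have htmem : t ∈ s := List.mem_of_mem_filter (PySem.List.max?_mem ht)
  obtain ⟨i, hilen, hival⟩ := List.mem_iff_getElem.mp htmem
  apply bsearch_eq s t hs
  · exact ⟨i, by exact_mod_cast Nat.zero_le i,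
      by simp only [PySem.List.len_eq]; omega,
      by rw [List.getElem?_eq_some_iff]; exact ⟨hilen, hival⟩⟩
  · norm_num
  · simp [PySem.List.len_eq]
  · simp only [PySem.List.len_eq]; push_cast; omega
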